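-- pv_equiv track=rewrite | github.com/vthai321/cs161 | cool.py | cool_xy
-- ===== SOURCE A (Python) =====
-- def cool_xy(n, x, y):
--     # x and y are relatively prime numbers
--     # compute the nth xy cool number (x and/or y is a factor of this number)
--     # O(log n + log x + log y) efficiency (divide the list)
--
--     # think about bounds index wise
--
--     # [1, 2, 3, 4, 5, 6, 7, 8, 9, 10, 11, 12, 13, 14, 15] (middle number is 8)
--
--     left, right = 1, n * max(x,y) # can't possibly have nth number be larger than n times the max``
--
--     while left <= right:
--         mid = (left + right) // 2
--         value = (mid // x) + (mid // y) - (mid // (x*y)) # which number are we in the divisible by x or y sequence? Think of indexing, subtract double count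
--         if value < n:
--             left = mid + 1
--         else:
--             right = mid - 1
--     return left # at this point you've zoned in on the proper term
-- ===== SOURCE B (Python) =====
-- def cool_xy(n, x, y):
--     # Newton-style jump scan instead of binary search: starting from 1, repeatedly
--     # jump forward by an underestimate of the distance still needed for the
--     # inclusion-exclusion count to reach n, then snap to the next multiple of x
--     # or y (the only places the count can grow); the nth number divisible by x
--     # or y is at most n * max(x, y).
--     upper = n * max(x, y)
--     m = 1
--     while m <= upper:
--         short = n - (m // x + m // y - m // (x * y))
--         if short <= 0:
--             return m
--         # any stretch of length L adds at most L/x + L/y + 2 to the count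
--         t = m + ((short - 2) * (x * y)) // (x + y) if short > 2 else m
--         m = min((t // x + 1) * x, (t // y + 1) * y)
--     return m
-- ===== Notes on version B (the rewrite author's own statement) =====
-- stated objective: alternative
-- what changed: Replaces the binary search over [1, n*max(x,y)] with a forward Newton-style jump scan: from m = 1 it repeatedly jumps by an underestimate (short-2)*x*y//(x+y) of the distance the inclusion-exclusion count still needs, then snaps to the next multiple of x or y, stopping at the first m whose count reaches n; Pre_ excludes inputs whose loop actually runs with a non-positive divisor, where A either raises ZeroDivisionError or binary-searches a non-monotone count whose landing point is accidental.
-- outside the precondition, e.g. on cool_xy(1, 0, 1): A raises ZeroDivisionError, B raises ZeroDivisionError; on cool_xy(-11, -4, -3): A returns 34, B returns 1; on cool_xy(2, -3, 5): A returns 11, B returns -24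
import Mathlib
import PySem

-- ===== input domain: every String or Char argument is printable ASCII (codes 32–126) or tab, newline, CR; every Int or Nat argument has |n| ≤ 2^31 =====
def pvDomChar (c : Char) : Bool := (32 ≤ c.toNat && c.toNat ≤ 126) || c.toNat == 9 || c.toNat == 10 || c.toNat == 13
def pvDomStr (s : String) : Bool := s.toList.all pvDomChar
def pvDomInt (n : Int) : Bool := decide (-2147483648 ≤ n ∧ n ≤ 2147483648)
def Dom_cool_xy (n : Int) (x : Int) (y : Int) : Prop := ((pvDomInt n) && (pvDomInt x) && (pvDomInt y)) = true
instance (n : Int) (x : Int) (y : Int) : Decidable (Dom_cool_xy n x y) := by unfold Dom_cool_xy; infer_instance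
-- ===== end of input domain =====

-- B replaces A's binary search over [1, n*max(x,y)] by a forward Newton-style jump scan
-- (jump by an underestimate of the remaining distance, snap to the next multiple of x or y);
-- a different algorithm of similar cost.


-- ===== PORT A =====
-- the while-loop of A: binary search on [left, right]
def cool_xyLoop (n : Int) (x : Int) (y : Int) (left : Int) (right : Int) : Int :=
  if h : left ≤ right then
    let mid := PySem.Int.floordiv (left + right) 2
    let value := PySem.Int.floordiv mid x + PySem.Int.floordiv mid y
                   - PySem.Int.floordiv mid (x * y)
    if value < n then cool_xyLoop n x y (mid + 1) right
    else cool_xyLoop n x y left (mid - 1)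
  else left
termination_by (right + 1 - left).toNat
decreasing_by
  all_goals
    have hb := PySem.Int.floordiv_two_mid_bounds h
    omega

def cool_xy (n : Int) (x : Int) (y : Int) : Int :=
  cool_xyLoop n x y 1 (n * max x y)

-- ===== PORT B =====
-- the while-loop of Source B: jump forward, snap to the next multiple of x or y.
-- The 'if h : m < m'' dichotomy is a totality guard only: on Pre_ inputs the new
-- position is always strictly larger (the Python loop always progresses there).
def pvShort (n : Int) (x : Int) (y : Int) (m : Int) : Int :=
  n - (PySem.Int.floordiv m x + PySem.Int.floordiv m y - PySem.Int.floordiv m (x * y))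

-- the jump target t of Source B
def pvTarget (n : Int) (x : Int) (y : Int) (m : Int) : Int :=
  if 2 < pvShort n x y m then
    m + PySem.Int.floordiv ((pvShort n x y m - 2) * (x * y)) (x + y)
  else m

-- the next position of Source B: the first multiple of x or y beyond the target
def pvNext (n : Int) (x : Int) (y : Int) (m : Int) : Int :=
  min ((PySem.Int.floordiv (pvTarget n x y m) x + 1) * x)
      ((PySem.Int.floordiv (pvTarget n x y m) y + 1) * y)

def cool_xyJump (n : Int) (x : Int) (y : Int) (upper : Int) (m : Int) : Int :=
  if hc : m ≤ upper then
    if pvShort n x y m ≤ 0 then m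
    else
      if h : m < pvNext n x y m then cool_xyJump n x y upper (pvNext n x y m)
      else pvNext n x y m
  else m
termination_by (upper + 1 - m).toNat
decreasing_by omega

def cool_xy_alt (n : Int) (x : Int) (y : Int) : Int :=
  cool_xyJump n x y (n * max x y) 1

-- ===== PRECONDITION & SPEC =====
-- Pre_ excludes exactly the inputs whose loop actually runs (1 ≤ n*max(x,y)) with a
-- non-positive divisor: with x or y zero A raises ZeroDivisionError there, and with a
-- negative divisor A binary-searches a non-monotone count, so its landing point is an
-- accident of probe order (on such inputs A and B genuinely return different values).
def Pre_cool_xy (n : Int) (x : Int) (y : Int) : Prop :=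
  1 ≤ n * max x y → (1 ≤ x ∧ 1 ≤ y)
instance (n : Int) (x : Int) (y : Int) : Decidable (Pre_cool_xy n x y) := by
  unfold Pre_cool_xy; infer_instance

def pvWitness_cool_xy : Int × Int × Int := (3, 2, 3)

def Spec_cool_xy (n : Int) (x : Int) (y : Int) (out : Int) : Prop := out = cool_xy_alt n x y
instance (n : Int) (x : Int) (y : Int) (out : Int) : Decidable (Spec_cool_xy n x y out) := by
  unfold Spec_cool_xy; infer_instance

-- ===== CLAIM (what is proved, stated in full; the proofs are below) =====
def Claim_equal_cool_xy : Prop := ∀ (n : Int) (x : Int) (y : Int), Dom_cool_xy n x y → Pre_cool_xy n x y → Spec_cool_xy n x y (cool_xy n x y)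

-- ===== LEMMAS AND PROOFS =====

-- the inclusion-exclusion count in Int.ediv form (divisors positive throughout the proofs)
def pvF (x : Int) (y : Int) (m : Int) : Int := m / x + m / y - m / (x * y)

lemma rank_eq_F (x y m : Int) (hx : 1 ≤ x) (hy : 1 ≤ y) :
    PySem.Int.floordiv m x + PySem.Int.floordiv m y - PySem.Int.floordiv m (x * y)
      = pvF x y m := by
  have hxy : (0:Int) < x * y := mul_pos (by omega) (by omega)
  simp [pvF, PySem.Int.floordiv_eq_ediv_of_pos (show (0:Int) < x by omega),
        PySem.Int.floordiv_eq_ediv_of_pos (show (0:Int) < y by omega),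
        PySem.Int.floordiv_eq_ediv_of_pos hxy]

lemma succ_ediv (x m : Int) (hx : 0 < x) :
    (m + 1) / x = m / x + (if x ∣ (m + 1) then 1 else 0) := by
  by_cases h : x ∣ (m + 1)
  · obtain ⟨k, hk⟩ := h
    have h1 : (m + 1) / x = k := by rw [hk, Int.mul_ediv_cancel_left _ (by omega)]
    have hm : m = (x - 1) + (k - 1) * x := by linear_combination hk
    have h2 : m / x = k - 1 := by
      conv_lhs => rw [hm]
      rw [Int.add_mul_ediv_right _ _ (by omega : x ≠ 0),
          Int.ediv_eq_zero_of_lt (by omega) (by omega)]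
      omega
    have hd : x ∣ (m + 1) := ⟨k, hk⟩
    simp [hd, h1, h2]
  · have hq := Int.emod_add_mul_ediv (m + 1) x
    have hr0 : 0 ≤ (m + 1) % x := Int.emod_nonneg _ (by omega)
    have hrx : (m + 1) % x < x := Int.emod_lt_of_pos _ hx
    have hrne : (m + 1) % x ≠ 0 := fun h0 => h ((Int.dvd_iff_emod_eq_zero ..).2 h0)
    have hm : m = ((m + 1) % x - 1) + ((m + 1) / x) * x := by linear_combination - hq
    have h2 : m / x = (m + 1) / x := by
      conv_lhs => rw [hm]
      rw [Int.add_mul_ediv_right _ _ (by omega : x ≠ 0),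
          Int.ediv_eq_zero_of_lt (by omega) (by omega)]
      omega
    simp [h, h2]

-- one step of the count: it never decreases, and it increases only at a multiple of x or y
lemma pvF_step (x y m : Int) (hx : 1 ≤ x) (hy : 1 ≤ y) :
    pvF x y m ≤ pvF x y (m + 1) ∧
      (pvF x y m < pvF x y (m + 1) → x ∣ (m + 1) ∨ y ∣ (m + 1)) := by
  have hxy : (0:Int) < x * y := mul_pos (by omega) (by omega)
  have ex := succ_ediv x m (by omega)
  have ey := succ_ediv y m (by omega)
  have exy := succ_ediv (x * y) m hxy
  unfold pvF
  rw [ex, ey, exy]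
  constructor
  · split_ifs <;>
      first
        | omega
        | exact absurd (dvd_trans (dvd_mul_right x y) (by assumption)) (by assumption)
  · intro hlt
    by_contra hc
    push Not at hc
    obtain ⟨hc1, hc2⟩ := hc
    simp [hc1, hc2] at hlt
    split_ifs at hlt <;> omega

lemma pvF_mono (x y : Int) (hx : 1 ≤ x) (hy : 1 ≤ y) {m m' : Int} (h : m ≤ m') :
    pvF x y m ≤ pvF x y m' := by
  have key : ∀ k : Nat, pvF x y m ≤ pvF x y (m + k) := by
    intro k
    induction k with
    | zero => simp
    | succ j ih =>
        have hstep := (pvF_step x y (m + j) hx hy).1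
        push_cast
        push_cast at ih
        calc pvF x y m ≤ pvF x y (m + j) := ih
          _ ≤ pvF x y (m + j + 1) := hstep
          _ = pvF x y (m + (j + 1)) := by ring_nf
  have hk : m' = m + ((m' - m).toNat : Int) := by omega
  rw [hk]; exact key _

-- ediv is antitone in a positive divisor for a nonnegative dividend
lemma ediv_anti (p b c : Int) (hp : 0 ≤ p) (hb : 0 < b) (hbc : b ≤ c) :
    p / c ≤ p / b := by
  have h1 : p / c * c ≤ p := Int.ediv_mul_le _ (by omega)
  have h2 : 0 ≤ p / c := Int.ediv_nonneg hp (by omega)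
  have h3 : p / c * b ≤ p / c * c := by nlinarith
  exact (Int.le_ediv_iff_mul_le hb).2 (by omega)

-- the count reaches n at the bound n*max(x,y)
lemma pvF_upper (n x y : Int) (hx : 1 ≤ x) (hy : 1 ≤ y) (hn : 1 ≤ n) :
    n ≤ pvF x y (n * max x y) := by
  rcases max_choice x y with hm | hm <;> rw [hm]
  · have h1 : n * x / x = n := Int.mul_ediv_cancel _ (by omega)
    have h2 : n * x / (x * y) ≤ n * x / y :=
      ediv_anti _ _ _ (by nlinarith) (by omega) (by nlinarith)
    unfold pvF; omega
  · have h1 : n * y / y = n := Int.mul_ediv_cancel _ (by omega)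
    have h2 : n * y / (x * y) ≤ n * y / x :=
      ediv_anti _ _ _ (by nlinarith) (by omega) (by nlinarith)
    unfold pvF; omega

-- over a stretch of length L the count grows by less than L/x + L/y + 2
lemma pvF_window (x y m L k : Int) (hx : 1 ≤ x) (hy : 1 ≤ y) (hL : 0 ≤ L)
    (hLk : L * (x + y) ≤ (k - 2) * (x * y)) :
    pvF x y (m + L) < pvF x y m + k := by
  have hxy : (0:Int) < x * y := mul_pos (by omega) (by omega)
  have hax : (m + L) / x * x ≤ m + L := Int.ediv_mul_le _ (by omega)
  have hbx : m < (m / x + 1) * x := Int.lt_ediv_add_one_mul_self _ (by omega)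
  have hay : (m + L) / y * y ≤ m + L := Int.ediv_mul_le _ (by omega)
  have hby : m < (m / y + 1) * y := Int.lt_ediv_add_one_mul_self _ (by omega)
  have hdxy : m / (x * y) ≤ (m + L) / (x * y) := Int.ediv_le_ediv hxy (by omega)
  set dx := (m + L) / x - m / x with hdxdef
  set dy := (m + L) / y - m / y with hdydef
  have hbx' : m < m / x * x + x := by nlinarith [hbx]
  have hby' : m < m / y * y + y := by nlinarith [hby]
  have hdxx : dx * x = (m + L) / x * x - m / x * x := by rw [hdxdef]; ring
  have hdyy : dy * y = (m + L) / y * y - m / y * y := by rw [hdydef]; ring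
  have hdx : dx * x < L + x := by omega
  have hdy : dy * y < L + y := by omega
  have hdx0 : 0 ≤ dx := by
    have := Int.ediv_le_ediv (show (0:Int) < x by omega) (show m ≤ m + L by omega)
    omega
  have hdy0 : 0 ≤ dy := by
    have := Int.ediv_le_ediv (show (0:Int) < y by omega) (show m ≤ m + L by omega)
    omega
  have hmulx : dx * (x * y) < (L + x) * y := by nlinarith
  have hmuly : dy * (x * y) < (L + y) * x := by nlinarith
  have hsum : (dx + dy) * (x * y) < k * (x * y) := by nlinarith
  have hlt : dx + dy < k := by
    by_contra hh
    push Not at hh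
    nlinarith
  have : pvF x y (m + L) - pvF x y m ≤ dx + dy := by
    unfold pvF; omega
  omega

-- a multiple of d strictly beyond t is at least the next multiple of d after t
lemma next_multiple_le (d t K : Int) (hd : 1 ≤ d) (hdvd : d ∣ K) (htK : t < K) :
    (t / d + 1) * d ≤ K := by
  obtain ⟨c, hc⟩ := hdvd
  have h1 : t / d * d ≤ t := Int.ediv_mul_le _ (by omega)
  have h2 : t / d * d < d * c := by omega
  have h3 : t / d < c := by nlinarith
  calc (t / d + 1) * d ≤ c * d := by nlinarith
    _ = K := by rw [hc]; ring

-- A's binary search zeroes in on the least crossing K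
lemma loopA_eq (n x y K left right : Int) (hx : 1 ≤ x) (hy : 1 ≤ y)
    (hK1 : 1 ≤ K) (hlow : ∀ m, 1 ≤ m → m < K → pvF x y m < n) (hKn : n ≤ pvF x y K)
    (hl : 1 ≤ left) (h2 : left ≤ K) (h3 : K ≤ right + 1) :
    cool_xyLoop n x y left right = K := by
  rw [cool_xyLoop]
  by_cases hlr : left ≤ right
  · rw [dif_pos hlr]
    obtain ⟨hb1, hb2⟩ := PySem.Int.floordiv_two_mid_bounds hlr
    show (if PySem.Int.floordiv (PySem.Int.floordiv (left + right) 2) x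
              + PySem.Int.floordiv (PySem.Int.floordiv (left + right) 2) y
              - PySem.Int.floordiv (PySem.Int.floordiv (left + right) 2) (x * y) < n
          then cool_xyLoop n x y (PySem.Int.floordiv (left + right) 2 + 1) right
          else cool_xyLoop n x y left (PySem.Int.floordiv (left + right) 2 - 1)) = K
    generalize hmid : PySem.Int.floordiv (left + right) 2 = mid at hb1 hb2 ⊢
    rw [rank_eq_F x y mid hx hy]
    by_cases hlt : pvF x y mid < n
    · rw [if_pos hlt]
      have hmidK : mid < K := by
        by_contra hh
        have := pvF_mono x y hx hy (show K ≤ mid by omega)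
        omega
      exact loopA_eq n x y K (mid + 1) right hx hy hK1 hlow hKn (by omega) (by omega) h3
    · rw [if_neg hlt]
      have hKmid : K ≤ mid := by
        by_contra hh
        have := hlow mid (by omega) (by omega)
        omega
      exact loopA_eq n x y K left (mid - 1) hx hy hK1 hlow hKn hl h2 (by omega)
  · rw [dif_neg hlr]
    omega
termination_by (right + 1 - left).toNat
decreasing_by all_goals omega

-- B's jump scan also stops at the least crossing K
lemma jump_eq (n x y K upper m : Int) (hx : 1 ≤ x) (hy : 1 ≤ y)
    (hlow : ∀ j, 1 ≤ j → j < K → pvF x y j < n) (hKn : n ≤ pvF x y K)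
    (hdvd : x ∣ K ∨ y ∣ K)
    (hm1 : 1 ≤ m) (hmK : m ≤ K) (hKu : K ≤ upper) :
    cool_xyJump n x y upper m = K := by
  have hxy : (0:Int) < x * y := mul_pos (by omega) (by omega)
  have hsF : pvShort n x y m = n - pvF x y m := by
    unfold pvShort; rw [rank_eq_F x y m hx hy]
  rw [cool_xyJump, dif_pos (by omega : m ≤ upper)]
  by_cases hs : pvShort n x y m ≤ 0
  · rw [if_pos hs]
    by_contra hne
    have := hlow m hm1 (by omega)
    omega
  · rw [if_neg hs]
    have hmK' : m < K := by
      rcases eq_or_lt_of_le hmK with h | h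
      · exfalso; rw [h] at hs hsF; omega
      · exact h
    -- the jump target stays strictly below K
    have htm : m ≤ pvTarget n x y m := by
      unfold pvTarget
      split_ifs with h2s
      · rw [PySem.Int.floordiv_eq_ediv_of_pos (show (0:Int) < x + y by omega)]
        have := Int.ediv_nonneg (show (0:Int) ≤ (pvShort n x y m - 2) * (x * y) by nlinarith)
          (show (0:Int) ≤ x + y by omega)
        omega
      · omega
    have htK : pvTarget n x y m < K := by
      unfold pvTarget
      split_ifs with h2s
      · rw [PySem.Int.floordiv_eq_ediv_of_pos (show (0:Int) < x + y by omega)]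
        set L := (pvShort n x y m - 2) * (x * y) / (x + y) with hLdef
        have hL0 : 0 ≤ L := Int.ediv_nonneg (by nlinarith) (by omega)
        have hLle : L * (x + y) ≤ (pvShort n x y m - 2) * (x * y) :=
          Int.ediv_mul_le _ (by omega)
        have hwin := pvF_window x y m L (pvShort n x y m) hx hy hL0 hLle
        rw [hsF] at hwin
        by_contra hh
        push Not at hh
        have := pvF_mono x y hx hy (show K ≤ m + L by omega)
        omega
      · omega
    -- the snap lands strictly beyond the target and at or below K
    have hnx : pvTarget n x y m < (PySem.Int.floordiv (pvTarget n x y m) x + 1) * x := by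
      rw [PySem.Int.floordiv_eq_ediv_of_pos (show (0:Int) < x by omega)]
      exact Int.lt_ediv_add_one_mul_self _ (by omega)
    have hny : pvTarget n x y m < (PySem.Int.floordiv (pvTarget n x y m) y + 1) * y := by
      rw [PySem.Int.floordiv_eq_ediv_of_pos (show (0:Int) < y by omega)]
      exact Int.lt_ediv_add_one_mul_self _ (by omega)
    have hm'm : m < pvNext n x y m := by
      unfold pvNext
      have := lt_min hnx hny
      omega
    have hm'K : pvNext n x y m ≤ K := by
      unfold pvNext
      rcases hdvd with hdv | hdv
      · calc min ((PySem.Int.floordiv (pvTarget n x y m) x + 1) * x)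
              ((PySem.Int.floordiv (pvTarget n x y m) y + 1) * y)
            ≤ (PySem.Int.floordiv (pvTarget n x y m) x + 1) * x := min_le_left _ _
          _ ≤ K := by
              rw [PySem.Int.floordiv_eq_ediv_of_pos (show (0:Int) < x by omega)]
              exact next_multiple_le x (pvTarget n x y m) K hx hdv htK
      · calc min ((PySem.Int.floordiv (pvTarget n x y m) x + 1) * x)
              ((PySem.Int.floordiv (pvTarget n x y m) y + 1) * y)
            ≤ (PySem.Int.floordiv (pvTarget n x y m) y + 1) * y := min_le_right _ _
          _ ≤ K := by
              rw [PySem.Int.floordiv_eq_ediv_of_pos (show (0:Int) < y by omega)]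
              exact next_multiple_le y (pvTarget n x y m) K hy hdv htK
    rw [dif_pos hm'm]
    exact jump_eq n x y K upper (pvNext n x y m) hx hy hlow hKn hdvd (by omega) hm'K hKu
termination_by (K - m).toNat
decreasing_by omega

-- ===== VERDICT (by name: the statement is the Claim_ definition above) =====
theorem cool_xy_spec : Claim_equal_cool_xy := by
  intro n x y _hdom hpre
  unfold Spec_cool_xy cool_xy cool_xy_alt
  by_cases hu : 1 ≤ n * max x y
  · obtain ⟨hx, hy⟩ := hpre hu
    have hmax : (1:Int) ≤ max x y := le_trans hx (le_max_left x y)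
    have hn : 1 ≤ n := by nlinarith
    have hup : n ≤ pvF x y (n * max x y) := pvF_upper n x y hx hy hn
    have hPex : ∃ k : Nat, n ≤ pvF x y (1 + (k : Int)) :=
      ⟨(n * max x y - 1).toNat, by
        have heq : (1 : Int) + ((n * max x y - 1).toNat : Int) = n * max x y := by omega
        rw [heq]; exact hup⟩
    set K : Int := 1 + ((Nat.find hPex : Nat) : Int) with hKdef
    have hKn : n ≤ pvF x y K := Nat.find_spec hPex
    have hK1 : 1 ≤ K := by omega
    have hlow : ∀ m, 1 ≤ m → m < K → pvF x y m < n := by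
      intro m h1 h2
      have hj : m = 1 + (((m - 1).toNat : Nat) : Int) := by omega
      have hjlt : (m - 1).toNat < Nat.find hPex := by omega
      have hmin := Nat.find_min hPex hjlt
      rw [hj]; omega
    have hKu : K ≤ n * max x y := by
      by_contra hh
      have := hlow (n * max x y) (by omega) (by omega)
      omega
    -- K is a multiple of x or of y: the count strictly grows at K
    have hdvd : x ∣ K ∨ y ∣ K := by
      by_cases hK2 : K = 1
      · by_contra hc
        push Not at hc
        have hx2 : 2 ≤ x := by
          rcases eq_or_lt_of_le hx with h | h
          · exact absurd (hK2 ▸ (h ▸ one_dvd K : x ∣ K)) hc.1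
          · omega
        have hy2 : 2 ≤ y := by
          rcases eq_or_lt_of_le hy with h | h
          · exact absurd (hK2 ▸ (h ▸ one_dvd K : y ∣ K)) hc.2
          · omega
        have e1 : (1:Int) / x = 0 := Int.ediv_eq_zero_of_lt (by omega) (by omega)
        have e2 : (1:Int) / y = 0 := Int.ediv_eq_zero_of_lt (by omega) (by omega)
        have e3 : (1:Int) / (x * y) = 0 := Int.ediv_eq_zero_of_lt (by omega) (by nlinarith)
        rw [hK2] at hKn
        unfold pvF at hKn
        omega
      · have hstep := (pvF_step x y (K - 1) hx hy).2
        have hlt : pvF x y (K - 1) < pvF x y K := by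
          have := hlow (K - 1) (by omega) (by omega)
          omega
        have hres := hstep (by simpa using hlt)
        simpa using hres
    rw [loopA_eq n x y K 1 (n * max x y) hx hy hK1 hlow hKn (le_refl 1) hK1 (by omega),
        jump_eq n x y K (n * max x y) 1 hx hy hlow hKn hdvd (le_refl 1) hK1 hKu]
  · rw [cool_xyLoop, dif_neg (by omega : ¬ (1:Int) ≤ n * max x y),
        cool_xyJump, dif_neg (by omega : ¬ (1:Int) ≤ n * max x y)]
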